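-- pv_equiv track=rewrite | github.com/DayAlgorithm/Kwak-Yong-Jin | 5.금/389479.py | solution
-- ===== SOURCE A (Python) =====
-- def solution(players, m, k):
--     answer = 0
--     servers = [1] * (len(players))
--     for i in range(len(players)):
--         cur = players[i]
--         ability = servers[i] * m
--         if ability > cur: # 수용 가능
--             continue
--         else:
--             need = (cur-ability)//m + 1
--             answer += need
--             for j in range(i, i+k): # 서버 수 증가시켜주기
--                 if j == len(servers): # 넘치면 멈추기
--                     break
--                 servers[j] += need
--     return answer
-- ===== SOURCE B (Python) =====
-- def solution(players, m, k):
--     n = len(players)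
--     dec = [0] * (n + 1)   # difference array: pending capacity expirations
--     add = 0               # extra servers currently active at this index
--     answer = 0
--     for i, cur in enumerate(players):
--         add -= dec[i]
--         ability = (1 + add) * m
--         if ability <= cur:
--             need = (cur - ability) // m + 1
--             answer += need
--             end = min(i + k, n)
--             if end > i:
--                 add += need
--                 dec[end] += need
--     return answer
-- ===== Notes on version B (the rewrite author's own statement) =====
-- stated objective: alternative
-- what changed: Replaces A's inner loop that bumps every server slot in the window by a difference array plus a running sum of active additions, so each outer step does O(1) work instead of O(k).
import Mathlib
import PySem

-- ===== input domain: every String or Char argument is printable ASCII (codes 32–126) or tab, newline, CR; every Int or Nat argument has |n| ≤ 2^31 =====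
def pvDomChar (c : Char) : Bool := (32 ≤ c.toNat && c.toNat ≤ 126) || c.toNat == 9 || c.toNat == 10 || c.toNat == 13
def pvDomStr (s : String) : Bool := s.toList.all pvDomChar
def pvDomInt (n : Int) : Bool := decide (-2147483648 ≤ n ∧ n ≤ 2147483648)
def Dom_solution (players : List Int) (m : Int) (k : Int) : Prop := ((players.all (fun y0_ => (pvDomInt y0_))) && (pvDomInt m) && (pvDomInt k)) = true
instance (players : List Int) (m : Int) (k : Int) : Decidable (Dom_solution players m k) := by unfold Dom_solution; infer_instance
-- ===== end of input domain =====

-- B replaces A's inner window-update loop by a difference array with a running sum of active additions; equality of return values is proved on all inputs where Python A returns.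

-- ===== PORT A =====
-- inner loop 'for j in range(i, i+k): if j == len(servers): break; servers[j] += need'
-- (range(i, i+k) iterated as a counter of k.toNat = max(k,0) steps from j = i, as Python materialises it)
def bumpA (servers : List Int) (need : Int) (j : Nat) (cnt : Nat) : List Int :=
  match cnt with
  | 0 => servers
  | c + 1 =>
      if j = servers.length then servers
      else bumpA (servers.set j (servers.getD j 0 + need)) need (j + 1) c

-- outer loop 'for i in range(len(players))' as recursion on i (players[i], servers[i] are in range)
def loopA (players : List Int) (m k : Int) (i : Nat) (answer : Int) (servers : List Int) : Int :=
  if i < players.length then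
    let cur := players.getD i 0
    let ability := servers.getD i 0 * m
    if ability > cur then loopA players m k (i + 1) answer servers
    else
      let need := PySem.Int.floordiv (cur - ability) m + 1
      loopA players m k (i + 1) (answer + need) (bumpA servers need i k.toNat)
  else answer
termination_by players.length - i

def solution (players : List Int) (m : Int) (k : Int) : Int :=
  loopA players m k 0 0 (List.replicate players.length 1)

-- ===== PORT B =====
-- 'for i, cur in enumerate(players)' as recursion on i; dec is the difference array, add the running sum
def loopB (players : List Int) (m k : Int) (i : Nat) (answer : Int) (add : Int) (dec : List Int) : Int :=
  if i < players.length then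
    let add := add - dec.getD i 0
    let cur := players.getD i 0
    let ability := (1 + add) * m
    if ability ≤ cur then
      let need := PySem.Int.floordiv (cur - ability) m + 1
      let e := min ((i : Int) + k) (players.length : Int)
      if (i : Int) < e then
        loopB players m k (i + 1) (answer + need) (add + need)
          (dec.set e.toNat (dec.getD e.toNat 0 + need))
      else loopB players m k (i + 1) (answer + need) add dec
    else loopB players m k (i + 1) answer add dec
  else answer
termination_by players.length - i

def solution_alt (players : List Int) (m : Int) (k : Int) : Int :=
  loopB players m k 0 0 0 (List.replicate (players.length + 1) 0)

-- ===== PRECONDITION & SPEC =====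
-- Pre_ excludes exactly the inputs where Python A raises ZeroDivisionError: m = 0 together with
-- some player ≥ 0 (then the else-branch fires and computes //m); A returns normally everywhere else.
def Pre_solution (players : List Int) (m : Int) (k : Int) : Prop :=
  m ≠ 0 ∨ ∀ p ∈ players, p < 0
instance (players : List Int) (m : Int) (k : Int) : Decidable (Pre_solution players m k) := by
  unfold Pre_solution; infer_instance

def pvWitness_solution : List Int × Int × Int := ([3, 1, 4], 2, 2)

def Spec_solution (players : List Int) (m : Int) (k : Int) (out : Int) : Prop := out = solution_alt players m k
instance (players : List Int) (m : Int) (k : Int) (out : Int) : Decidable (Spec_solution players m k out) := by unfold Spec_solution; infer_instance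

-- ===== CLAIM (what is proved, stated in full; the proofs are below) =====
def Claim_equal_solution : Prop := ∀ (players : List Int) (m : Int) (k : Int), Dom_solution players m k → Pre_solution players m k → Spec_solution players m k (solution players m k)

-- ===== LEMMAS AND PROOFS =====

-- Σ_{t ∈ [a,b)} dec[t] (0 past the end), the value the difference array represents
def S (dec : List Int) (a b : Nat) : Int := ∑ t ∈ Finset.Ico a b, dec.getD t 0

lemma S_empty (dec : List Int) (a b : Nat) (h : b ≤ a) : S dec a b = 0 := by
  simp [S, Finset.Ico_eq_empty (by omega : ¬ a < b)]

lemma S_bot (dec : List Int) (a b : Nat) (h : a < b) :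
    S dec a b = dec.getD a 0 + S dec (a + 1) b := by
  simp [S, Finset.sum_eq_sum_Ico_succ_bot h]

lemma getD_set_add (dec : List Int) (p : Nat) (need : Int) (hp : p < dec.length) (t : Nat) :
    (dec.set p (dec.getD p 0 + need)).getD t 0 = dec.getD t 0 + (if t = p then need else 0) := by
  by_cases h : t = p
  · subst h
    simp [List.getD, hp]
  · simp [List.getD, List.getElem?_set_ne (by omega : p ≠ t), h]

lemma S_set (dec : List Int) (p : Nat) (need : Int) (hp : p < dec.length) (a b : Nat) :
    S (dec.set p (dec.getD p 0 + need)) a b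
      = S dec a b + (if a ≤ p ∧ p < b then need else 0) := by
  unfold S
  rw [Finset.sum_congr rfl (fun t _ => getD_set_add dec p need hp t),
      Finset.sum_add_distrib]
  congr 1
  rw [Finset.sum_ite_eq' (Finset.Ico a b) p (fun _ => need)]
  simp [Finset.mem_Ico]

lemma bumpA_length (servers : List Int) (need : Int) (j cnt : Nat) :
    (bumpA servers need j cnt).length = servers.length := by
  induction cnt generalizing servers j with
  | zero => rfl
  | succ c ih =>
      rw [bumpA]
      split
      · rfl
      · rw [ih]; simp

lemma bumpA_getD (servers : List Int) (need : Int) (j cnt : Nat) (hj : j ≤ servers.length) (t : Nat) :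
    (bumpA servers need j cnt).getD t 0
      = servers.getD t 0 + (if j ≤ t ∧ t < min (j + cnt) servers.length then need else 0) := by
  induction cnt generalizing servers j with
  | zero =>
      rw [bumpA]
      have hno : ¬ (j ≤ t ∧ t < min (j + 0) servers.length) := by omega
      rw [if_neg hno]; ring
  | succ c ih =>
      rw [bumpA]
      split
      · rename_i hlen
        have hno : ¬ (j ≤ t ∧ t < min (j + (c + 1)) servers.length) := by omega
        rw [if_neg hno]; ring
      · rename_i hlen
        have hjlt : j < servers.length := by omega
        have hlen' : (servers.set j (servers.getD j 0 + need)).length = servers.length := by simp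
        rw [ih _ _ (by omega)]
        rw [getD_set_add servers j need hjlt t]
        rw [hlen']
        by_cases h1 : t = j <;> by_cases h2 : j + 1 ≤ t ∧ t < min (j + 1 + c) servers.length <;>
          by_cases h3 : j ≤ t ∧ t < min (j + (c + 1)) servers.length <;>
          simp [h1, h2, h3] <;> omega

-- the loop invariant: A's servers list agrees with B's (add, dec) representation on all future indices
lemma loop_eq (players : List Int) (m k : Int) :
    ∀ (d i : Nat) (answer add : Int) (servers dec : List Int),
      players.length - i = d →
      servers.length = players.length →
      dec.length = players.length + 1 →
      (∀ j, i ≤ j → j < players.length → servers.getD j 0 = 1 + add - S dec i (j + 1)) →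
      loopA players m k i answer servers = loopB players m k i answer add dec := by
  intro d
  induction d with
  | zero =>
      intro i answer add servers dec hd hs hdec hinv
      have hni : ¬ i < players.length := by omega
      rw [loopA, loopB]
      simp [hni]
  | succ d ih =>
      intro i answer add servers dec hd hs hdec hinv
      have hi : i < players.length := by omega
      have hSi : S dec i (i + 1) = dec.getD i 0 := by
        rw [S_bot dec i (i + 1) (by omega), S_empty dec (i + 1) (i + 1) le_rfl]; ring
      have hab : servers.getD i 0 * m = (1 + (add - dec.getD i 0)) * m := by
        rw [hinv i le_rfl hi, hSi]; ring
      rw [loopA, loopB]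
      simp only [hi, if_pos]
      by_cases hcur : servers.getD i 0 * m > players.getD i 0
      · -- continue branch
        have hcur' : ¬ (1 + (add - dec.getD i 0)) * m ≤ players.getD i 0 := by
          rw [← hab]; omega
        simp only [hcur, if_pos, hcur', if_neg, not_false_iff]
        exact ih (i + 1) answer (add - dec.getD i 0) servers dec (by omega) hs hdec
          (fun j hj1 hj2 => by
            rw [hinv j (by omega) hj2, S_bot dec i (j + 1) (by omega)]; ring)
      · -- expansion branch
        have hcur' : (1 + (add - dec.getD i 0)) * m ≤ players.getD i 0 := by
          rw [← hab]; omega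
        simp only [hcur, if_neg, not_false_iff, hcur', if_pos]
        rw [← hab]
        set need := PySem.Int.floordiv (players.getD i 0 - servers.getD i 0 * m) m + 1 with hneed
        by_cases hk : (i : Int) < min ((i : Int) + k) (players.length : Int)
        · -- window nonempty: 0 < k
          have hkpos : 0 < k := by omega
          simp only [hk, if_pos]
          set e : Int := min ((i : Int) + k) (players.length : Int) with he
          have heN : e.toNat = min (i + k.toNat) players.length := by omega
          have hep : e.toNat < dec.length := by omega
          apply ih (i + 1) (answer + need) (add - dec.getD i 0 + need)
            (bumpA servers need i k.toNat)
            (dec.set e.toNat (dec.getD e.toNat 0 + need))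
            (by omega) (by rw [bumpA_length]; exact hs) (by simp [hdec])
          intro j hj1 hj2
          rw [bumpA_getD servers need i k.toNat (by omega) j]
          rw [hinv j (by omega) hj2]
          have hSsplit : S dec i (j + 1) = dec.getD i 0 + S dec (i + 1) (j + 1) :=
            S_bot dec i (j + 1) (by omega)
          rw [S_set dec e.toNat need hep (i + 1) (j + 1)]
          rw [hs]
          by_cases hwin : j < e.toNat
          · have h1 : i ≤ j ∧ j < min (i + k.toNat) players.length := by omega
            have h2 : ¬ (i + 1 ≤ e.toNat ∧ e.toNat < j + 1) := by omega
            rw [if_pos h1, if_neg h2, hSsplit]; ring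
          · have h1 : ¬ (i ≤ j ∧ j < min (i + k.toNat) players.length) := by omega
            have h2 : i + 1 ≤ e.toNat ∧ e.toNat < j + 1 := by omega
            rw [if_neg h1, if_pos h2, hSsplit]; ring
        · -- window empty: k ≤ 0, bumpA does nothing
          have hk0 : k.toNat = 0 := by omega
          simp only [hk, if_neg, not_false_iff]
          rw [hk0]
          exact ih (i + 1) (answer + need) (add - dec.getD i 0) servers dec (by omega) hs hdec
            (fun j hj1 hj2 => by
              rw [hinv j (by omega) hj2, S_bot dec i (j + 1) (by omega)]; ring)

-- ===== VERDICT (by name: the statement is the Claim_ definition above) =====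
theorem solution_spec : Claim_equal_solution := by
  intro players m k _ _
  unfold Spec_solution solution solution_alt
  apply loop_eq players m k (players.length - 0) 0 0 0 _ _ rfl (by simp) (by simp)
  intro j hj1 hj2
  have h1 : (List.replicate players.length (1:Int)).getD j 0 = 1 := by
    simp [List.getD, hj2]
  have h2 : S (List.replicate (players.length + 1) (0:Int)) 0 (j + 1) = 0 := by
    apply Finset.sum_eq_zero; intro t _
    rcases lt_or_ge t (players.length + 1) with h | h
    · simp [List.getD, h]
    · simp [List.getD, List.getElem?_eq_none_iff.2 (by simp only [List.length_replicate]; omega : (List.replicate (players.length + 1) (0:Int)).length ≤ t)]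
  rw [h1, h2]; ring
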